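-- pv_equiv track=rewrite | github.com/integritasmrv/integritas-mrv-pipeline | hatchet_worker_v2_part1.py | _build_evidence_context
-- ===== SOURCE A (Python) =====
-- def _build_evidence_context(evidence_rows: list, max_chars: int = 12000) -> str:
--     chunks: list[str] = []
--     size = 0
--     for e in evidence_rows:
--         part = (f"[{e.get('collector_name', '')}] {e.get('source_url', '') or ''}\n"
--                 f"{(e.get('raw_content', '') or '')[:1200]}")
--         size += len(part)
--         if size > max_chars:
--             break
--         chunks.append(part)
--     return "\n\n---\n\n".join(chunks)
-- ===== SOURCE B (Python) =====
-- def _build_evidence_context(evidence_rows: list, max_chars: int = 12000) -> str: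
--     def fmt(e):
--         head = "[{}] {}".format(e.get('collector_name', ''), e.get('source_url') or '')
--         body = (e.get('raw_content') or '')[:1200]
--         return "\n".join([head, body])
--     parts = [fmt(e) for e in evidence_rows]
--     sums = []
--     acc = 0
--     for p in parts:
--         acc += len(p)
--         sums.append(acc)
--     cutoff = 0
--     for s in sums:
--         if s > max_chars:
--             break
--         cutoff += 1
--     return "\n\n---\n\n".join(parts[:cutoff])
-- ===== Notes on version B (the rewrite author's own statement) =====
-- stated objective: alternative
-- what changed: Replaces A's single break-driven scan that formats, accumulates a size and appends in one loop with a staged decomposition: format every part up front, build the list of prefix sums of their lengths, find the cutoff as the number of leading prefix sums that stay within max_chars, and join that many leading parts.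
import Mathlib
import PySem

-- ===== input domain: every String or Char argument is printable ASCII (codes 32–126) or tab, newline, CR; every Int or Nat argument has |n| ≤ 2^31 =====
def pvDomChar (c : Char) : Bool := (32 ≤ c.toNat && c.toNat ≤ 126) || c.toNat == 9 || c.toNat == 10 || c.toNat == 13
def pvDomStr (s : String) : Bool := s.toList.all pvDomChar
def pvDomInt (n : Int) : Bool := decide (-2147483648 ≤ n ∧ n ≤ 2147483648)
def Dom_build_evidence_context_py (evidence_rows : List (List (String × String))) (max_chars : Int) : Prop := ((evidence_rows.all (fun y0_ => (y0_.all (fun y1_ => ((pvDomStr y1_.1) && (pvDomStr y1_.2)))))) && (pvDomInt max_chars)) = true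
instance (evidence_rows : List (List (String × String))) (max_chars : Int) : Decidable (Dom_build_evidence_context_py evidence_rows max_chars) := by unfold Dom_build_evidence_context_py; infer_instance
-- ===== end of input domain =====

-- B replaces A's single break-driven loop (format, accumulate size, append) by staged passes:
-- format all parts, then prefix sums of lengths, then a cutoff count, then join the prefix
-- (objective: alternative decomposition, same cost).

-- ===== PORT A =====
-- part = f"[{e.get('collector_name','')}] {e.get('source_url','') or ''}\n{(e.get('raw_content','') or '')[:1200]}"
def pvFmtA (e : List (String × String)) : String :=
  let name := (PySem.Dict.mk e).getD "collector_name" ""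
  let url0 := (PySem.Dict.mk e).getD "source_url" ""
  let url := if url0 = "" then "" else url0          -- `or ''`
  let raw0 := (PySem.Dict.mk e).getD "raw_content" ""
  let raw := if raw0 = "" then "" else raw0          -- `or ''`
  "[" ++ name ++ "] " ++ url ++ "\n" ++ PySem.Str.slice raw none (some 1200)

-- the for-loop with `size` accumulator and `break`; chunks are produced in order
def pvLoopA (max_chars : Int) : List (List (String × String)) → Int → List String
  | [], _ => []
  | e :: rest, size =>
    let part := pvFmtA e
    let size' := size + PySem.Str.len part
    if size' > max_chars then [] else part :: pvLoopA max_chars rest size'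

def build_evidence_context_py (evidence_rows : List (List (String × String))) (max_chars : Int) : String :=
  PySem.Str.join "\n\n---\n\n" (pvLoopA max_chars evidence_rows 0)

-- ===== PORT B =====
-- fmt(e): head = "[{}] {}".format(...); body = (... or '')[:1200]; "\n".join([head, body])
def pvFmtB (e : List (String × String)) : String :=
  let d := PySem.Dict.mk e
  let head := "[" ++ (d.get? "collector_name").getD "" ++ "] " ++ (d.get? "source_url").getD ""
  let body := PySem.Str.slice ((d.get? "raw_content").getD "") none (some 1200)
  PySem.Str.join "\n" [head, body]

-- the prefix-sum loop: acc += len(p); sums.append(acc)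
def pvSums (acc : Int) : List String → List Int
  | [] => []
  | p :: ps => (acc + PySem.Str.len p) :: pvSums (acc + PySem.Str.len p) ps

-- the cutoff loop: for s in sums: if s > max_chars: break; cutoff += 1
def pvCutoff (max_chars : Int) : List Int → Nat
  | [] => 0
  | s :: rest => if s > max_chars then 0 else pvCutoff max_chars rest + 1

def build_evidence_context_py_alt (evidence_rows : List (List (String × String))) (max_chars : Int) : String :=
  let parts := evidence_rows.map pvFmtB
  let sums := pvSums 0 parts
  let cutoff := pvCutoff max_chars sums
  PySem.Str.join "\n\n---\n\n" (parts.take cutoff)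

-- ===== PRECONDITION & SPEC =====
def Spec_build_evidence_context_py (evidence_rows : List (List (String × String))) (max_chars : Int) (out : String) : Prop := out = build_evidence_context_py_alt evidence_rows max_chars
instance (evidence_rows : List (List (String × String))) (max_chars : Int) (out : String) : Decidable (Spec_build_evidence_context_py evidence_rows max_chars out) := by unfold Spec_build_evidence_context_py; infer_instance

-- ===== CLAIM =====
def Claim_equal_build_evidence_context_py : Prop := ∀ (evidence_rows : List (List (String × String))) (max_chars : Int), Dom_build_evidence_context_py evidence_rows max_chars → Spec_build_evidence_context_py evidence_rows max_chars (build_evidence_context_py evidence_rows max_chars)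

-- ===== LEMMAS AND PROOFS =====

lemma pvJoin2 (a b : String) : PySem.Str.join "\n" [a, b] = a ++ "\n" ++ b := by
  apply String.toList_inj.mp
  simp [PySem.Str.join, PySem.Chars.join, List.intercalate]

lemma pvFmtB_eq : pvFmtB = pvFmtA := by
  funext e
  unfold pvFmtA pvFmtB
  simp only [PySem.Dict.getD_eq_get?_getD]
  by_cases hu : ((PySem.Dict.mk e).get? "source_url").getD "" = "" <;>
    by_cases hr : ((PySem.Dict.mk e).get? "raw_content").getD "" = "" <;>
      simp [hu, hr, pvJoin2]

lemma pvLoopA_eq (mc : Int) (rows : List (List (String × String))) (t : Int) :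
    pvLoopA mc rows t =
      (rows.map pvFmtA).take (pvCutoff mc (pvSums t (rows.map pvFmtA))) := by
  induction rows generalizing t with
  | nil => simp [pvLoopA, pvSums, pvCutoff]
  | cons e rest ih =>
    simp only [List.map_cons, pvSums, pvCutoff, pvLoopA]
    by_cases h : t + PySem.Str.len (pvFmtA e) > mc
    · rw [if_pos h, if_pos h]; simp
    · rw [if_neg h, if_neg h, List.take_succ_cons, ih]

-- ===== VERDICT =====
theorem build_evidence_context_py_spec : Claim_equal_build_evidence_context_py := by
  intro rows mc _
  show build_evidence_context_py rows mc = build_evidence_context_py_alt rows mc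
  unfold build_evidence_context_py build_evidence_context_py_alt
  rw [pvFmtB_eq, pvLoopA_eq]
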